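-- pv_equiv track=rewrite | github.com/pypi-data/pypi-mirror-162 | packages/CoDocParser/CoDocParser-0.2.46.tar.gz/CoDocParser-0.2.46/docparser/core/utils.py | location_in_cell_pos
-- ===== SOURCE A (Python) =====
-- def location_in_cell_pos(cell_value, keyword):
--     """
--     查找内容所在单元各格内行号,列号,文本总行数，文本列内容最大长度
--     """
--     start_row_in_cell = -1
--     start_col_in_cell = -1
--     if len(keyword) > 0 and keyword in cell_value:
--         lines = cell_value.strip().split("\n")
--         for row, line in enumerate(lines):
--             col = line.find(keyword)
--             if col > -1:
--                 start_row_in_cell = row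
--                 start_col_in_cell = col
--                 break
--
--     return start_row_in_cell, start_col_in_cell
-- ===== SOURCE B (Python) =====
-- def location_in_cell_pos(cell_value, keyword):
--     """Single substring search on the stripped text plus offset arithmetic,
--     instead of splitting into lines and scanning them one by one."""
--     if len(keyword) == 0 or keyword not in cell_value or "\n" in keyword:
--         return -1, -1
--     stripped = cell_value.strip()
--     idx = stripped.find(keyword)
--     if idx == -1:
--         return -1, -1
--     pre = stripped[:idx]
--     return pre.count("\n"), len(pre) - (pre.rfind("\n") + 1)
-- ===== Notes on version B (the rewrite author's own statement) =====
-- stated objective: alternative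
-- what changed: Replaces the split-into-lines loop with one substring search on the stripped text, recovering the row as the newline count before the match and the column from the last newline before it; a keyword containing a newline is rejected up front since it can never match within a single line.
import Mathlib
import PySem

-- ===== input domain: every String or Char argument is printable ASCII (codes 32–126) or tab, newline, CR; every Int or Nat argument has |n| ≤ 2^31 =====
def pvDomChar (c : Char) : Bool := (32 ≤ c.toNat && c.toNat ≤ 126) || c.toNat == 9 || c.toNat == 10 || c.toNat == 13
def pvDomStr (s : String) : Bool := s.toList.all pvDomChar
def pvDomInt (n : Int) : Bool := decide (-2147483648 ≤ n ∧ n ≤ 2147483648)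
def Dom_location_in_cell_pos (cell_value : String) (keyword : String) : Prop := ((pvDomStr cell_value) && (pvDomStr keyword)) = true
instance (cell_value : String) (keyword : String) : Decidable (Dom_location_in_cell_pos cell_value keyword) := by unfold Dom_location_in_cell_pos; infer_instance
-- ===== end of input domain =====

-- B replaces A's per-line scan by one substring search plus newline-offset arithmetic (objective: alternative).

-- ===== PORT A =====
-- the 'for row, line in enumerate(lines): … break' loop of A
def goA (kw : List Char) : List (List Char) → Nat → Int × Int
  | [], _ => (-1, -1)
  | line :: rest, row =>
      let col := PySem.Chars.find line kw
      if col > -1 then ((row : Int), col) else goA kw rest (row + 1)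

def location_in_cell_pos (cell_value : String) (keyword : String) : Int × Int :=
  if 0 < PySem.Str.len keyword ∧ PySem.Str.isIn keyword cell_value = true then
    let lines := PySem.Chars.splitOn (PySem.Chars.strip cell_value.toList) ['\n']
    goA keyword.toList lines 0
  else (-1, -1)

-- ===== PORT B =====
def location_in_cell_pos_alt (cell_value : String) (keyword : String) : Int × Int :=
  if PySem.Str.len keyword = 0 ∨ PySem.Str.isIn keyword cell_value = false ∨ PySem.Str.isIn "\n" keyword = true then
    (-1, -1)
  else
    let stripped := PySem.Chars.strip cell_value.toList
    let idx := PySem.Chars.find stripped keyword.toList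
    if idx = -1 then (-1, -1)
    else
      let pre := PySem.Chars.slice stripped (some 0) (some idx)
      ((PySem.Chars.count pre ['\n'] : Int), (PySem.Chars.len pre : Int) - (PySem.Chars.rfind pre ['\n'] + 1))

-- ===== PRECONDITION & SPEC =====
def Spec_location_in_cell_pos (cell_value : String) (keyword : String) (out : Int × Int) : Prop := out = location_in_cell_pos_alt cell_value keyword
instance (cell_value : String) (keyword : String) (out : Int × Int) : Decidable (Spec_location_in_cell_pos cell_value keyword out) := by unfold Spec_location_in_cell_pos; infer_instance

-- ===== CLAIM (what is proved, stated in full; the proofs are below) =====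
def Claim_equal_location_in_cell_pos : Prop := ∀ (cell_value : String) (keyword : String), Dom_location_in_cell_pos cell_value keyword → Spec_location_in_cell_pos cell_value keyword (location_in_cell_pos cell_value keyword)

-- ===== LEMMAS AND PROOFS =====

-- a reference splitter: what splitOn.go computes once the fuel suffices
def splitAux (pre : List Char) : List Char → List (List Char)
  | [] => [pre]
  | c :: t => if c = '\n' then pre :: splitAux [] t else splitAux (pre ++ [c]) t

theorem splitOn_go_spec : ∀ (l : List Char), ∀ (fuel : Nat) (cur : List Char) (acc : List (List Char)),
    l.length < fuel →
    PySem.Chars.splitOn.go ['\n'] fuel l cur acc = acc.reverse ++ splitAux cur.reverse l := by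
  intro l
  induction l with
  | nil =>
      intro fuel cur acc h
      obtain ⟨f, rfl⟩ : ∃ f, fuel = f + 1 := ⟨fuel - 1, by omega⟩
      rw [PySem.Chars.splitOn.go]
      · simp [splitAux]
      · omega
  | cons c t ih =>
      intro fuel cur acc h
      obtain ⟨f, rfl⟩ : ∃ f, fuel = f + 1 := ⟨fuel - 1, by omega⟩
      rw [PySem.Chars.splitOn.go]
      by_cases hc : c = '\n'
      · subst hc
        simp only [List.isPrefixOf, BEq.rfl, Bool.and_self, if_pos, List.length_cons,
          List.length_nil, List.drop_succ_cons, List.drop_zero]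
        rw [ih f [] (cur.reverse :: acc) (by simp at h; omega)]
        simp [splitAux]
      · have hpf : List.isPrefixOf ['\n'] (c :: t) = false := by
          simp [List.isPrefixOf]; exact fun hh => (hc hh.symm).elim
        rw [hpf]
        simp only [Bool.false_eq_true, if_false]
        rw [ih f (c :: cur) acc (by simp at h; omega)]
        simp [splitAux, hc]

theorem splitOn_eq_splitAux (s : List Char) :
    PySem.Chars.splitOn s ['\n'] = splitAux [] s := by
  rw [PySem.Chars.splitOn, splitOn_go_spec s (s.length + 1) [] [] (by omega)]
  simp

theorem splitAux_no_nl (l : List Char) : ∀ pre, '\n' ∉ pre →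
    ∀ piece ∈ splitAux pre l, '\n' ∉ piece := by
  induction l with
  | nil => intro pre h piece hm; simp [splitAux] at hm; subst hm; exact h
  | cons c t ih =>
      intro pre h piece hm
      by_cases hc : c = '\n'
      · subst hc; simp [splitAux] at hm
        rcases hm with rfl | hm
        · exact h
        · exact ih [] (by simp) piece hm
      · simp [splitAux, hc] at hm
        exact ih (pre ++ [c]) (by simp [h]; exact fun hh => (hc hh.symm).elim) piece hm

theorem splitAux_of_no_nl (l : List Char) : ∀ pre, '\n' ∉ l → splitAux pre l = [pre ++ l] := by
  induction l with
  | nil => intro pre _; simp [splitAux]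
  | cons c t ih =>
      intro pre h
      simp at h
      simp only [splitAux, if_neg (fun hh : c = '\n' => h.1 hh.symm)]
      rw [ih (pre ++ [c]) (fun hm => h.2 hm)]
      simp

theorem splitAux_append_nl (a : List Char) (b : List Char) : ∀ pre, '\n' ∉ a →
    splitAux pre (a ++ '\n' :: b) = (pre ++ a) :: splitAux [] b := by
  induction a with
  | nil => intro pre _; simp [splitAux]
  | cons c t ih =>
      intro pre h
      simp at h
      simp only [List.cons_append, splitAux, if_neg (fun hh : c = '\n' => h.1 hh.symm)]
      rw [ih (pre ++ [c]) (fun hm => h.2 hm)]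
      simp

theorem count_go_singleton (ch : Char) : ∀ (l : List Char) (fuel acc : Nat), l.length ≤ fuel →
    PySem.Chars.count.go [ch] fuel l acc = acc + l.count ch := by
  intro l
  induction l with
  | nil =>
      intro fuel acc h
      cases fuel with
      | zero => rw [PySem.Chars.count.go]; simp
      | succ f =>
          rw [PySem.Chars.count.go]
          · simp
          · omega
  | cons c t ih =>
      intro fuel acc h
      obtain ⟨f, rfl⟩ : ∃ f, fuel = f + 1 := ⟨fuel - 1, by simp at h; omega⟩
      rw [PySem.Chars.count.go]
      by_cases hc : ch = c
      · subst hc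
        simp only [List.isPrefixOf, BEq.rfl, Bool.and_self, if_pos, List.length_cons,
          List.length_nil, List.drop_succ_cons, List.drop_zero]
        rw [ih f (acc + 1) (by simp at h; omega)]
        simp
        omega
      · have hpf : List.isPrefixOf [ch] (c :: t) = false := by
          simp [List.isPrefixOf]; exact fun hh => (hc hh).elim
        rw [hpf]
        simp only [Bool.false_eq_true, if_false]
        rw [ih f acc (by simp at h; omega)]
        simp only [List.count_cons]
        have : (c == ch) = false := by simp; exact fun hh => (hc hh.symm).elim
        rw [this]
        simp

theorem count_singleton (p : List Char) (c : Char) :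
    PySem.Chars.count p [c] = p.count c := by
  rw [PySem.Chars.count]
  simp only [List.isEmpty_cons, if_false, Bool.false_eq_true]
  rw [count_go_singleton c p p.length 0 (le_refl _)]
  omega

theorem rfind_go_neg (p : List Char) (h : '\n' ∉ p) : ∀ j : Nat,
    PySem.Chars.rfind.go p ['\n'] j = -1 := by
  have key : ∀ k : Nat, List.isPrefixOf ['\n'] (p.drop k) = false := by
    intro k
    by_contra hh
    simp only [Bool.not_eq_false] at hh
    have := (List.isPrefixOf_iff_prefix.mp hh).subset (List.mem_singleton_self '\n')
    exact h (List.mem_of_mem_drop this)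
  intro j
  induction j with
  | zero => rw [PySem.Chars.rfind.go]; have := key 0; simp at this; simp [this]
  | succ n ih =>
      rw [PySem.Chars.rfind.go]
      rw [key (n + 1)]
      simpa using ih

theorem rfind_singleton_of_not_mem (p : List Char) (h : '\n' ∉ p) :
    PySem.Chars.rfind p ['\n'] = -1 := by
  rw [PySem.Chars.rfind]; exact rfind_go_neg p h _

theorem rfind_go_append (a b : List Char) (ha : '\n' ∉ a) : ∀ j : Nat,
    PySem.Chars.rfind.go (a ++ '\n' :: b) ['\n'] (a.length + 1 + j)
      = (a.length : Int) + 1 + PySem.Chars.rfind.go b ['\n'] j := by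
  have hgoa : PySem.Chars.rfind.go (a ++ '\n' :: b) ['\n'] a.length = (a.length : Int) := by
    cases hA : a.length with
    | zero =>
        have : a = [] := List.length_eq_zero_iff.mp hA
        subst this
        rw [PySem.Chars.rfind.go]
        simp [List.isPrefixOf]
    | succ m =>
        conv_lhs => rw [PySem.Chars.rfind.go]
        have hdrop : (a ++ '\n' :: b).drop (m + 1) = '\n' :: b := by
          rw [← hA]; exact List.drop_left
        rw [hdrop]
        simp [List.isPrefixOf]
  have hdropj : ∀ j : Nat, (a ++ '\n' :: b).drop (a.length + 1 + j) = b.drop j := by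
    intro j
    rw [List.drop_append]
    have h2 : List.drop (a.length + 1 + j) a = [] := by
      apply List.drop_eq_nil_of_le; omega
    have h3 : a.length + 1 + j - a.length = j + 1 := by omega
    rw [h2, h3]
    simp
  intro j
  induction j with
  | zero =>
      have h1 : a.length + 1 + 0 = a.length + 1 := by omega
      rw [h1]
      conv_lhs => rw [PySem.Chars.rfind.go]
      have hd0 : (a ++ '\n' :: b).drop (a.length + 1) = b := by
        have := hdropj 0
        simp only [Nat.add_zero, List.drop_zero] at this
        exact this
      rw [hd0]
      by_cases hb : List.isPrefixOf ['\n'] b = true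
      · rw [if_pos hb]
        conv_rhs => rw [PySem.Chars.rfind.go]
        rw [if_pos (by simpa using hb)]
        push_cast; ring
      · rw [if_neg hb, hgoa]
        conv_rhs => rw [PySem.Chars.rfind.go]
        rw [if_neg (by simpa using hb)]
        ring
  | succ n ih =>
      have h1 : a.length + 1 + (n + 1) = (a.length + 1 + n) + 1 := by omega
      rw [h1]
      conv_lhs => rw [PySem.Chars.rfind.go]
      have hd : (a ++ '\n' :: b).drop (a.length + 1 + n + 1) = b.drop (n + 1) := by
        have h2 : a.length + 1 + n + 1 = a.length + 1 + (n + 1) := by omega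
        rw [h2]; exact hdropj (n + 1)
      rw [hd]
      by_cases hb : List.isPrefixOf ['\n'] (b.drop (n + 1)) = true
      · rw [if_pos hb]
        conv_rhs => rw [PySem.Chars.rfind.go]
        rw [if_pos hb]
        push_cast; ring
      · rw [if_neg hb, ih]
        conv_rhs => rw [PySem.Chars.rfind.go]
        rw [if_neg hb]

theorem rfind_singleton_append (a b : List Char) (h : '\n' ∉ a) :
    PySem.Chars.rfind (a ++ '\n' :: b) ['\n'] = (a.length : Int) + 1 + PySem.Chars.rfind b ['\n'] := by
  rw [PySem.Chars.rfind, PySem.Chars.rfind]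
  have hlen : (a ++ '\n' :: b).length = a.length + 1 + b.length := by simp; omega
  rw [hlen]
  exact rfind_go_append a b h b.length

theorem infix_iff_occ (s kw : List Char) : kw <:+: s ↔ ∃ j, kw <+: s.drop j := by
  rw [← PySem.Chars.isIn_iff_infix, ← PySem.Chars.exists_prefix_drop_iff_isIn]

theorem find_eq_of_first (s kw : List Char) (c : Nat) (h1 : kw <+: s.drop c)
    (h2 : ∀ p, p < c → ¬ kw <+: s.drop p) : PySem.Chars.find s kw = (c : Int) := by
  have hin : kw <:+: s := (infix_iff_occ s kw).mpr ⟨c, h1⟩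
  have h0 : 0 ≤ PySem.Chars.find s kw := (PySem.Chars.find_nonneg_iff s kw).mpr hin
  obtain ⟨hpre, hmin⟩ := PySem.Chars.find_spec h0
  have hf : (PySem.Chars.find s kw).toNat = c := by
    rcases Nat.lt_trichotomy (PySem.Chars.find s kw).toNat c with h | h | h
    · exact absurd hpre (h2 _ h)
    · exact h
    · exact absurd h1 (hmin c h)
  omega

theorem find_eq_neg_one_of_no_occ (s kw : List Char) (h : ∀ p, ¬ kw <+: s.drop p) :
    PySem.Chars.find s kw = -1 := by
  rw [PySem.Chars.find_eq_neg_one_iff]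
  intro hin
  obtain ⟨j, hj⟩ := (infix_iff_occ s kw).mp hin
  exact h j hj

theorem prefix_of_prefix_append (A t kw : List Char) (h : kw <+: A ++ t)
    (hlen : kw.length ≤ A.length) : kw <+: A := by
  rw [List.prefix_iff_eq_take, List.take_append_of_le_length hlen] at h
  have := List.take_prefix kw.length A
  rwa [← h] at this

theorem occ_split (a b kw : List Char) (hnk : '\n' ∉ kw) (p : Nat)
    (h : kw <+: (a ++ '\n' :: b).drop p) :
    (p + kw.length ≤ a.length ∧ kw <+: a.drop p) ∨
    (a.length + 1 ≤ p ∧ kw <+: b.drop (p - a.length - 1)) := by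
  by_cases h1 : p + kw.length ≤ a.length
  · left
    refine ⟨h1, ?_⟩
    have hp : p ≤ a.length := by omega
    rw [List.drop_append_of_le_length hp] at h
    exact prefix_of_prefix_append _ _ _ h (by simp; omega)
  · by_cases h2 : a.length + 1 ≤ p
    · right
      refine ⟨h2, ?_⟩
      rw [List.drop_append] at h
      have h3 : List.drop p a = [] := List.drop_eq_nil_of_le (by omega)
      have h4 : p - a.length = (p - a.length - 1) + 1 := by omega
      rw [h3, h4] at h
      simpa using h
    · exfalso
      have hp : p ≤ a.length := by omega
      have hklen : a.length - p < kw.length := by omega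
      rw [List.prefix_iff_eq_take] at h
      have hlt : a.length - p < (List.take kw.length (List.drop p (a ++ '\n' :: b))).length := by
        rw [List.length_take, List.length_drop]
        simp only [List.length_append, List.length_cons]
        omega
      have hval : (List.take kw.length (List.drop p (a ++ '\n' :: b)))[a.length - p]'hlt = '\n' := by
        rw [List.getElem_take, List.getElem_drop]
        have heq : p + (a.length - p) = a.length := by omega
        simp only [heq]
        rw [List.getElem_append_right (le_refl a.length)]
        simp
      have hmm := List.getElem_mem hlt
      rw [hval] at hmm
      exact hnk (by rw [h]; exact hmm)

theorem find_append_left (l t kw : List Char) (c : Nat) (hc : PySem.Chars.find l kw = (c : Int))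
    (hk : kw ≠ []) : PySem.Chars.find (l ++ t) kw = (c : Int) := by
  have h0 : 0 ≤ PySem.Chars.find l kw := by rw [hc]; positivity
  obtain ⟨hpre, hmin⟩ := PySem.Chars.find_spec h0
  rw [hc] at hpre hmin
  simp only [Int.toNat_natCast] at hpre hmin
  have hcl : c + kw.length ≤ l.length := by
    have h1 := hpre.length_le
    have h2 : 0 < kw.length := List.length_pos_iff.mpr hk
    rw [List.length_drop] at h1
    omega
  apply find_eq_of_first
  · rw [List.drop_append_of_le_length (by omega)]
    exact hpre.trans (List.prefix_append _ _)
  · intro p hp hcon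
    rw [List.drop_append_of_le_length (by omega)] at hcon
    by_cases hpk : p + kw.length ≤ l.length
    · exact hmin p hp (prefix_of_prefix_append _ _ _ hcon (by simp; omega))
    · omega

theorem exists_nl_split : ∀ (s : List Char), '\n' ∈ s →
    ∃ a b, '\n' ∉ a ∧ s = a ++ '\n' :: b := by
  intro s
  induction s with
  | nil => intro h; cases h
  | cons c t ih =>
      intro h
      by_cases hc : c = '\n'
      · exact ⟨[], t, by simp, by simp [hc]⟩
      · have ht : '\n' ∈ t := by
          rcases List.mem_cons.mp h with h' | h'
          · exact absurd h'.symm hc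
          · exact h'
        obtain ⟨a, b, hna, hab⟩ := ih ht
        exact ⟨c :: a, b, by simp [hna]; exact fun hh => (hc hh.symm).elim, by simp [hab]⟩


theorem drop_append_nl (a b : List Char) (j : Nat) :
    (a ++ '\n' :: b).drop (a.length + 1 + j) = b.drop j := by
  rw [List.drop_append]
  have h2 : List.drop (a.length + 1 + j) a = [] := List.drop_eq_nil_of_le (by omega)
  have h3 : a.length + 1 + j - a.length = j + 1 := by omega
  rw [h2, h3]
  simp

theorem take_append_nl (a b : List Char) (j : Nat) :
    (a ++ '\n' :: b).take (a.length + 1 + j) = a ++ '\n' :: b.take j := by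
  rw [List.take_append]
  have h2 : List.take (a.length + 1 + j) a = a := List.take_of_length_le (by omega)
  have h3 : a.length + 1 + j - a.length = j + 1 := by omega
  rw [h2, h3, List.take_succ_cons]

theorem find_le_bound (l kw : List Char) (c : Nat) (hc : PySem.Chars.find l kw = (c : Int))
    (hk : kw ≠ []) : c + kw.length ≤ l.length := by
  have h0 : 0 ≤ PySem.Chars.find l kw := by rw [hc]; positivity
  obtain ⟨hpre, _⟩ := PySem.Chars.find_spec h0
  rw [hc] at hpre
  simp only [Int.toNat_natCast] at hpre
  have h1 := hpre.length_le
  have h2 : 0 < kw.length := List.length_pos_iff.mpr hk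
  rw [List.length_drop] at h1
  omega

theorem val_no_nl (s : List Char) (c : Nat) (hc : c ≤ s.length) (hnp : '\n' ∉ s.take c) (r : Nat) :
    ((r : Int) + ((s.take c).count '\n' : Int),
     ((s.take c).length : Int) - (PySem.Chars.rfind (s.take c) ['\n'] + 1)) = ((r : Int), (c : Int)) := by
  have h1 : (s.take c).count '\n' = 0 := List.count_eq_zero.mpr hnp
  rw [h1, rfind_singleton_of_not_mem _ hnp, List.length_take]
  rw [Prod.mk.injEq]
  constructor
  · simp
  · have : min c s.length = c := Nat.min_eq_left hc
    rw [this]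
    ring

theorem main_no_nl (kw : List Char) (s : List Char) (hs : '\n' ∉ s) (r : Nat) :
    goA kw (PySem.Chars.splitOn s ['\n']) r =
      (if PySem.Chars.find s kw = -1 then (-1, -1)
       else ((r : Int) + ((s.take (PySem.Chars.find s kw).toNat).count '\n' : Int),
             ((s.take (PySem.Chars.find s kw).toNat).length : Int)
               - (PySem.Chars.rfind (s.take (PySem.Chars.find s kw).toNat) ['\n'] + 1))) := by
  rw [splitOn_eq_splitAux, splitAux_of_no_nl s [] hs]
  simp only [List.nil_append]
  by_cases hf : PySem.Chars.find s kw = -1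
  · rw [if_pos hf]
    simp [goA, hf]
  · rw [if_neg hf]
    have h0 : 0 ≤ PySem.Chars.find s kw := by
      have := PySem.Chars.neg_one_le_find s kw; omega
    have hcle : (PySem.Chars.find s kw).toNat ≤ s.length := by
      have := PySem.Chars.find_le_length s kw; omega
    rw [val_no_nl s _ hcle (fun hm => hs (List.take_subset _ _ hm)) r]
    simp only [goA]
    rw [if_pos (by omega)]
    rw [Prod.mk.injEq]
    constructor
    · rfl
    · omega

-- characterisation of A's loop over the lines of s in terms of one search in s
theorem main_aux (kw : List Char) (hk : kw ≠ []) (hnk : '\n' ∉ kw) :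
    ∀ n : Nat, ∀ s : List Char, s.length ≤ n → ∀ r : Nat,
    goA kw (PySem.Chars.splitOn s ['\n']) r =
      (if PySem.Chars.find s kw = -1 then (-1, -1)
       else ((r : Int) + ((s.take (PySem.Chars.find s kw).toNat).count '\n' : Int),
             ((s.take (PySem.Chars.find s kw).toNat).length : Int)
               - (PySem.Chars.rfind (s.take (PySem.Chars.find s kw).toNat) ['\n'] + 1))) := by
  intro n
  induction n with
  | zero =>
      intro s hs r
      have hnil : s = [] := List.eq_nil_of_length_eq_zero (by omega)
      subst hnil
      exact main_no_nl kw [] (by simp) r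
  | succ n ih =>
      intro s hs r
      by_cases hmem : '\n' ∈ s
      · obtain ⟨a, b, hna, rfl⟩ := exists_nl_split s hmem
        have hlen : b.length ≤ n := by simp at hs; omega
        rw [splitOn_eq_splitAux, splitAux_append_nl a b [] hna]
        simp only [List.nil_append]
        by_cases hfa : PySem.Chars.find a kw = -1
        · -- keyword not in the first line
          have hnocc_a : ∀ p, ¬ kw <+: a.drop p := by
            intro p hp
            have : kw <:+: a := (infix_iff_occ a kw).mpr ⟨p, hp⟩
            exact (PySem.Chars.find_eq_neg_one_iff a kw).mp hfa this
          simp only [goA, hfa]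
          rw [if_neg (by omega)]
          rw [← splitOn_eq_splitAux, ih b hlen (r + 1)]
          by_cases hfb : PySem.Chars.find b kw = -1
          · -- keyword nowhere
            have hfs : PySem.Chars.find (a ++ '\n' :: b) kw = -1 := by
              apply find_eq_neg_one_of_no_occ
              intro p hp
              rcases occ_split a b kw hnk p hp with ⟨_, hocc⟩ | ⟨_, hocc⟩
              · exact hnocc_a _ hocc
              · have : kw <:+: b := (infix_iff_occ b kw).mpr ⟨_, hocc⟩
                exact (PySem.Chars.find_eq_neg_one_iff b kw).mp hfb this
            rw [if_pos hfb, if_pos hfs]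
          · -- first occurrence is inside b
            have h0b : 0 ≤ PySem.Chars.find b kw := by
              have := PySem.Chars.neg_one_le_find b kw; omega
            set cb := (PySem.Chars.find b kw).toNat with hcb
            have hfbe : PySem.Chars.find b kw = (cb : Int) := by omega
            obtain ⟨hpreb, hminb⟩ := PySem.Chars.find_spec h0b
            have hfs : PySem.Chars.find (a ++ '\n' :: b) kw = ((a.length + 1 + cb : Nat) : Int) := by
              apply find_eq_of_first
              · rw [drop_append_nl]
                exact hpreb
              · intro p hp hcon
                rcases occ_split a b kw hnk p hcon with ⟨_, hocc⟩ | ⟨hge, hocc⟩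
                · exact hnocc_a _ hocc
                · exact hminb _ (by omega) hocc
            rw [if_neg hfb, if_neg (by rw [hfs]; omega)]
            rw [hfs]
            simp only [Int.toNat_natCast]
            rw [take_append_nl]
            have hcount : (a ++ '\n' :: b.take cb).count '\n'
                = 1 + (b.take cb).count '\n' := by
              rw [List.count_append, List.count_cons]
              have : a.count '\n' = 0 := List.count_eq_zero.mpr hna
              simp [this]
              omega
            rw [hcount, rfind_singleton_append a (b.take cb) hna]
            rw [Prod.mk.injEq]
            constructor
            · push_cast; ring
            · simp only [List.length_append, List.length_cons]
              push_cast; ring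
        · -- keyword found in the first line
          have h0a : 0 ≤ PySem.Chars.find a kw := by
            have := PySem.Chars.neg_one_le_find a kw; omega
          set ca := (PySem.Chars.find a kw).toNat with hca
          have hfae : PySem.Chars.find a kw = (ca : Int) := by omega
          have hbound := find_le_bound a kw ca hfae hk
          have hfs : PySem.Chars.find (a ++ '\n' :: b) kw = (ca : Int) :=
            find_append_left a ('\n' :: b) kw ca hfae hk
          simp only [goA, hfae]
          rw [if_pos (by omega)]
          rw [if_neg (by rw [hfs]; omega), hfs]
          simp only [Int.toNat_natCast]
          have htake : (a ++ '\n' :: b).take ca = a.take ca :=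
            List.take_append_of_le_length (by omega)
          rw [htake]
          rw [val_no_nl a ca (by omega) (fun hm => hna (List.take_subset _ _ hm)) r]
      · exact main_no_nl kw s hmem r

theorem goA_all_neg (kw : List Char) (ls : List (List Char))
    (h : ∀ l ∈ ls, PySem.Chars.find l kw = -1) : ∀ r, goA kw ls r = (-1, -1) := by
  induction ls with
  | nil => intro r; rfl
  | cons l rest ih =>
      intro r
      have hl := h l (by simp)
      simp only [goA, hl]
      rw [if_neg (by omega)]
      exact ih (fun x hx => h x (by simp [hx])) (r + 1)

-- ===== VERDICT (by name: the statement is the Claim_ definition above) =====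
theorem location_in_cell_pos_spec : Claim_equal_location_in_cell_pos := by
  intro cv kw _
  unfold Spec_location_in_cell_pos
  simp only [location_in_cell_pos, location_in_cell_pos_alt]
  by_cases hg : 0 < PySem.Str.len kw ∧ PySem.Str.isIn kw cv = true
  · rw [if_pos hg]
    have hklen : kw.toList ≠ [] := by
      have h1 := hg.1
      rw [PySem.Str.len_eq] at h1
      intro hh
      rw [hh] at h1
      simp at h1
    by_cases hnl : PySem.Str.isIn "\n" kw = true
    · -- the keyword contains a newline: A's per-line search can never match
      rw [if_pos (Or.inr (Or.inr hnl))]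
      have hmemnl : '\n' ∈ kw.toList := by
        rw [PySem.Str.isIn_eq] at hnl
        have h2 : ("\n".toList) <:+: kw.toList := (PySem.Chars.isIn_iff_infix _ _).mp hnl
        exact h2.subset (List.mem_singleton_self _)
      apply goA_all_neg
      intro l hl
      have hlnl : '\n' ∉ l := by
        rw [splitOn_eq_splitAux] at hl
        exact splitAux_no_nl _ [] (by simp) l hl
      rw [PySem.Chars.find_eq_neg_one_iff]
      intro hin
      exact hlnl (hin.subset hmemnl)
    · rw [if_neg (by
        rintro (h | h | h)
        · have := hg.1; omega
        · rw [hg.2] at h; simp at h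
        · exact hnl h)]
      have hnk : '\n' ∉ kw.toList := by
        intro hm
        apply hnl
        rw [PySem.Str.isIn_eq]
        rw [PySem.Chars.isIn_iff_infix]
        obtain ⟨x, y, hxy⟩ := List.append_of_mem hm
        exact ⟨x, y, by rw [hxy]; simp⟩
      rw [main_aux kw.toList hklen hnk (PySem.Chars.strip cv.toList).length
        (PySem.Chars.strip cv.toList) (le_refl _) 0]
      set s := PySem.Chars.strip cv.toList with hsdef
      by_cases hf : PySem.Chars.find s kw.toList = -1
      · rw [if_pos hf, if_pos hf]
      · rw [if_neg hf, if_neg hf]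
        have h0 : 0 ≤ PySem.Chars.find s kw.toList := by
          have := PySem.Chars.neg_one_le_find s kw.toList; omega
        have hsl : PySem.Chars.slice s (some 0) (some (PySem.Chars.find s kw.toList))
            = s.take (PySem.Chars.find s kw.toList).toNat := by
          rw [PySem.Chars.slice_eq_listSlice]
          have he : PySem.Chars.find s kw.toList
              = (((PySem.Chars.find s kw.toList).toNat : Nat) : Int) := by omega
          rw [he, (show (0 : Int) = ((0 : Nat) : Int) from rfl), PySem.List.slice_natCast]
          simp
          omega
        rw [hsl, count_singleton, PySem.Chars.len_eq]
        simp
  · rw [if_neg hg]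
    rw [if_pos (by
      by_cases hlen : 0 < PySem.Str.len kw
      · refine Or.inr (Or.inl ?_)
        cases hisin : PySem.Str.isIn kw cv with
        | false => rfl
        | true => exact absurd ⟨hlen, hisin⟩ hg
      · refine Or.inl ?_
        rw [PySem.Str.len_eq] at hlen ⊢
        omega)]
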